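-- pv_equiv track=rewrite | github.com/BaronVice/Inf2025 | 16/temp.py | F
-- ===== SOURCE A (Python) =====
-- def F(n):
--     if n == 1:
--         return 0
--     if n == 0:
--         return 1
--     if n > 1 and n % 2 == 0:
--         return F(n // 2) + 1
--     if n > 1 and n % 2 != 0:
--         return F(n // 2)
-- ===== SOURCE B (Python) =====
-- def F(n):
--     if n < 0:
--         return None
--     return bin(n)[2:].count('0')
-- ===== Notes on version B (the rewrite author's own statement) =====
-- stated objective: idiomatic
-- what changed: Replaces the four-branch recursion by building the binary representation once with bin() and counting '0' characters, with a single guard for negative input.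
-- outside the precondition, e.g. on F(-3): A returns None, B returns None
import Mathlib
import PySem

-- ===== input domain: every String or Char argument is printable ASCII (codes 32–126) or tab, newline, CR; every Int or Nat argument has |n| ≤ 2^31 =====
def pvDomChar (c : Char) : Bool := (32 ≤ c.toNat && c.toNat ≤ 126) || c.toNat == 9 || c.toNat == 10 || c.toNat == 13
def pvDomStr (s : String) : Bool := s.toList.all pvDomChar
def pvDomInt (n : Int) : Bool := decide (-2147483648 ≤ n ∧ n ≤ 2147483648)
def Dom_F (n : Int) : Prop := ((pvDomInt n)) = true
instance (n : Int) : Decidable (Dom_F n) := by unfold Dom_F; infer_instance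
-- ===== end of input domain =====

-- B replaces A's four-branch halving recursion by building the binary representation once
-- (Python's bin) and counting '0' characters (objective: idiomatic).

-- ===== PORT A =====
-- literal transliteration of A; the final 'else 0' branch corresponds to Python's fall-through
-- 'return None' on negative n, which Pre_F excludes.
def F (n : Int) : Int :=
  if n = 1 then 0
  else if n = 0 then 1
  else if n > 1 ∧ PySem.Int.mod n 2 = 0 then F (PySem.Int.floordiv n 2) + 1
  else if n > 1 ∧ PySem.Int.mod n 2 ≠ 0 then F (PySem.Int.floordiv n 2)
  else 0
termination_by n.toNat
decreasing_by
  all_goals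
    rename_i _ _ h3
    rw [PySem.Int.floordiv_eq_ediv_of_pos (by omega)]
    omega
  
-- ===== PORT B =====
-- digits of Python's bin(m) for m > 0 (most significant first)
def pyBinCore (m : Nat) : List Char :=
  if m = 0 then []
  else pyBinCore (m / 2) ++ [if m % 2 = 0 then '0' else '1']

-- bin(n)[2:] for n ≥ 0 (bin(0)[2:] = "0")
def pyBin (m : Nat) : List Char :=
  if m = 0 then ['0'] else pyBinCore m

-- Source B: if n < 0: return None (outside Pre_F; port returns 0 there); else bin(n)[2:].count('0')
def F_alt (n : Int) : Int :=
  if n < 0 then 0 else ((pyBin n.toNat).count '0' : Int)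

-- ===== PRECONDITION & SPEC =====
-- Pre_F excludes negative n, on which Python A falls through all branches and returns None
-- (not an int); B returns None there as well.
def Pre_F (n : Int) : Prop := 0 ≤ n
instance (n : Int) : Decidable (Pre_F n) := by unfold Pre_F; infer_instance
def pvWitness_F : Int := (6)

def Spec_F (n : Int) (out : Int) : Prop := out = F_alt n
instance (n : Int) (out : Int) : Decidable (Spec_F n out) := by unfold Spec_F; infer_instance

-- ===== CLAIM (what is proved, stated in full; the proofs are below) =====
def Claim_equal_F : Prop := ∀ (n : Int), Dom_F n → Pre_F n → Spec_F n (F n)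

-- ===== LEMMAS AND PROOFS =====

theorem pyBinCore_zero : pyBinCore 0 = [] := by rw [pyBinCore]; simp

theorem pyBinCore_one : pyBinCore 1 = ['1'] := by
  rw [pyBinCore]; norm_num [pyBinCore_zero]

theorem pyBinCore_count (m : Nat) (hm : 2 ≤ m) :
    (pyBinCore m).count '0'
      = (pyBinCore (m / 2)).count '0' + (if m % 2 = 0 then 1 else 0) := by
  rw [pyBinCore]
  simp only [if_neg (by omega : ¬ m = 0), List.count_append]
  split_ifs with h <;> simp

theorem F_eq_alt_nat (m : Nat) : F (m : Int) = F_alt (m : Int) := by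
  induction m using Nat.strong_induction_on with
  | _ m ih =>
    rcases m with _ | _ | k
    · simp only [Nat.cast_zero]; rw [F]; norm_num [F_alt, pyBin]
    · simp only [Nat.zero_add, Nat.cast_one]; rw [F]; norm_num [F_alt, pyBin, pyBinCore_one]
    ·
      have h2 : 2 ≤ k + 2 := by omega
      have hhalf : 1 ≤ (k + 2) / 2 := by omega
      have hmod : PySem.Int.mod ((k+2 : Nat) : Int) 2 = (((k+2) % 2 : Nat) : Int) :=
        PySem.Int.mod_natCast (k+2) 2
      have hdiv : PySem.Int.floordiv ((k+2 : Nat) : Int) 2 = (((k+2) / 2 : Nat) : Int) :=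
        PySem.Int.floordiv_natCast (k+2) 2
      have ihh : F ((((k+2) / 2 : Nat)) : Int) = F_alt ((((k+2) / 2 : Nat)) : Int) :=
        ih _ (by omega)
      have halt : F_alt ((((k+2) / 2 : Nat)) : Int) = ((pyBinCore ((k+2) / 2)).count '0' : Int) := by
        rw [F_alt, if_neg (by omega), Int.toNat_natCast, pyBin,
          if_neg (by omega : ¬ (k+2) / 2 = 0)]
      have hcount : F_alt ((k+2 : Nat) : Int) = ((pyBinCore (k+2)).count '0' : Int) := by
        rw [F_alt, if_neg (by omega), Int.toNat_natCast, pyBin,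
          if_neg (by omega : ¬ (k+2) = 0)]
      rw [hcount, pyBinCore_count _ h2]
      rcases Nat.even_or_odd (k+2) with he | ho
      · have hm0 : (k+2) % 2 = 0 := Nat.even_iff.mp he
        rw [F]
        simp only [if_neg (by omega : ¬ ((k+2:Nat) : Int) = 1),
          if_neg (by omega : ¬ ((k+2:Nat) : Int) = 0), hmod, hdiv, hm0]
        rw [if_pos ⟨by exact_mod_cast h2, by simp⟩, ihh, halt]
        simp
      · have hm1 : (k+2) % 2 = 1 := Nat.odd_iff.mp ho
        rw [F]
        simp only [if_neg (by omega : ¬ ((k+2:Nat) : Int) = 1),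
          if_neg (by omega : ¬ ((k+2:Nat) : Int) = 0), hmod, hdiv, hm1]
        rw [if_neg (by simp), if_pos ⟨by exact_mod_cast h2, by simp⟩, ihh, halt]
        simp

-- ===== VERDICT (by name: the statement is the Claim_ definition above) =====
theorem F_spec : Claim_equal_F := by
  intro n _ hpre
  have : n = ((n.toNat : Nat) : Int) := by
    exact (Int.toNat_of_nonneg hpre).symm
  rw [Spec_F, this]
  exact F_eq_alt_nat n.toNat
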